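-- pv_equiv track=rewrite | github.com/deep846/primeproduct | primeproduct.py | primeproduct
-- ===== SOURCE A (Python) =====
-- def primeproduct(m):
--     factor=[]
--     for i in range (1,m+1):
--         if(m%i==0):
--            factor.append(i)
--     if(len(factor)<=4):
--         return True
--     else:
--         return False
-- ===== SOURCE B (Python) =====
-- def primeproduct(m):
--     if m <= 0:
--         return True
--     count = 0
--     i = 1
--     while i * i <= m:
--         if m % i == 0:
--             count += 1 if i * i == m else 2
--             if count > 4:
--                 return False
--         i += 1
--     return count <= 4
-- ===== Notes on version B (the rewrite author's own statement) =====
-- stated objective: faster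
-- what changed: Instead of enumerating every i in 1..m and collecting all divisors into a list, B counts divisors in complementary pairs by trial division only up to sqrt(m), with an early exit once the count exceeds 4.
import Mathlib
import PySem

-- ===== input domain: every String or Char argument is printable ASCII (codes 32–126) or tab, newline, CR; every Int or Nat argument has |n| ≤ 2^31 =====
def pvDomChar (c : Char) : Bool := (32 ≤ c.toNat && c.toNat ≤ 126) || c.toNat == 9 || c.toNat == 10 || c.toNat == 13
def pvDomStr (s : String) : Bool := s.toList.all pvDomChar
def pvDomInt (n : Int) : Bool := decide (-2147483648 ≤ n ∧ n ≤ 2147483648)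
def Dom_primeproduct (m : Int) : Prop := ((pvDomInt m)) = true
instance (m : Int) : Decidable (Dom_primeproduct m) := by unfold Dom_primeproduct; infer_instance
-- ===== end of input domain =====

-- B counts divisors in complementary pairs by trial division up to sqrt(m) with early exit, instead of A's full scan of 1..m collecting every divisor into a list.


-- ===== PORT A =====
def primeproduct (m : Int) : Bool :=
  let factor := (PySem.List.pyRange 1 (m+1) 1).foldl
    (fun acc i => if PySem.Int.mod m i == 0 then acc ++ [i] else acc) ([] : List Int)
  if factor.length ≤ 4 then true else false

-- ===== PORT B =====
-- the while loop of Source B: i rises while i*i ≤ m, counting divisors in pairs, early exit past 4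
def ppLoop (m : Int) (i : Nat) (count : Nat) : Bool :=
  if (i : Int) * i ≤ m then
    if PySem.Int.mod m i == 0 then
      let c := count + (if (i : Int) * i == m then 1 else 2)
      if c > 4 then false else ppLoop m (i+1) c
    else ppLoop m (i+1) count
  else decide (count ≤ 4)
termination_by m.toNat + 1 - i * i
decreasing_by
  all_goals
    have h : (i : Int) * i ≤ m := by assumption
    have h2 : i * i < (i+1) * (i+1) := by nlinarith
    have h3 : i * i ≤ m.toNat := by
      have hc := Int.toNat_le_toNat (show ((i * i : Nat) : Int) ≤ m by push_cast; exact h)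
      rw [Int.toNat_natCast] at hc
      exact hc
    omega

def primeproduct_alt (m : Int) : Bool :=
  if m ≤ 0 then true else ppLoop m 1 0

-- ===== PRECONDITION & SPEC =====
def Spec_primeproduct (m : Int) (out : Bool) : Prop := out = primeproduct_alt m
instance (m : Int) (out : Bool) : Decidable (Spec_primeproduct m out) := by unfold Spec_primeproduct; infer_instance

-- ===== CLAIM (what is proved, stated in full; the proofs are below) =====
def Claim_equal_primeproduct : Prop := ∀ (m : Int), Dom_primeproduct m → Spec_primeproduct m (primeproduct m)

-- ===== LEMMAS AND PROOFS =====

-- the weight B's loop adds at candidate j, for n = m.toNat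
def wNat (n j : Nat) : Nat := if n % j = 0 then (if j * j = n then 1 else 2) else 0

-- the total B's loop still has to add from candidate i on
def restSum (m : Int) (i : Nat) : Nat :=
  if (i : Int) * i ≤ m then
    (if PySem.Int.mod m i == 0 then (if (i : Int) * i == m then 1 else 2) else 0) + restSum m (i+1)
  else 0
termination_by m.toNat + 1 - i * i
decreasing_by
  have h2 : i * i < (i+1) * (i+1) := by nlinarith
  have h3 : i * i ≤ m.toNat := by
    have hc := Int.toNat_le_toNat (show ((i * i : Nat) : Int) ≤ m by push_cast; assumption)
    rw [Int.toNat_natCast] at hc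
    exact hc
  omega

-- B's loop decides "count plus what is still to come stays ≤ 4" (the early exit is sound)
theorem ppLoop_eq (m : Int) (i count : Nat) :
    ppLoop m i count = decide (count + restSum m i ≤ 4) := by
  induction i, count using ppLoop.induct (m := m) with
  | case1 i count hle hmod hc ih =>
      have ihv : count + (if ((i:Int) * i == m) = true then 1 else 2) > 4 := ih
      rw [ppLoop, restSum]
      simp only [if_pos hle, if_pos hmod]
      rw [if_pos ihv]
      by_cases he : ((i:Int) * i == m) = true <;>
        simp only [he, if_true] at ihv ⊢ <;>
        · symm; rw [decide_eq_false_iff_not]; omega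
  | case2 i count hle hmod hc ih =>
      rename_i ih1
      have ihv : ¬ count + (if ((i:Int) * i == m) = true then 1 else 2) > 4 := ih
      have ih1v : ppLoop m (i+1) (count + (if ((i:Int) * i == m) = true then 1 else 2))
          = decide ((count + (if ((i:Int) * i == m) = true then 1 else 2)) + restSum m (i + 1) ≤ 4) := ih1
      rw [ppLoop, restSum]
      simp only [if_pos hle, if_pos hmod]
      rw [if_neg ihv, ih1v, decide_eq_decide]
      omega
  | case3 i count hle hmod ih =>
      rw [ppLoop, restSum]
      simp only [if_pos hle, if_neg hmod]
      rw [ih, decide_eq_decide]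
      omega
  | case4 i count hle =>
      rw [ppLoop, restSum, if_neg hle, if_neg hle]
      simp

-- the loop total is the sum of weights over the candidates i..sqrt(m)
theorem restSum_eq_sum (m : Int) (hm : 1 ≤ m) (i : Nat) (hi : 1 ≤ i) :
    restSum m i = ∑ j ∈ Finset.Ico i (Nat.sqrt m.toNat + 1), wNat m.toNat j := by
  induction i using restSum.induct (m := m) with
  | case1 i hle ih =>
      have hii : i * i ≤ m.toNat := by
        have h' : ((i * i : Nat) : Int) ≤ m := by push_cast; exact hle
        omega
      have hsq : i ≤ Nat.sqrt m.toNat := Nat.le_sqrt.mpr (by simpa [pow_two] using hii)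
      rw [restSum, if_pos hle, Finset.sum_eq_sum_Ico_succ_bot (by omega) (wNat m.toNat),
        ih (by omega)]
      congr 1
      have hmod : PySem.Int.mod m i = ((m.toNat % i : Nat) : Int) := by
        conv_lhs => rw [show m = ((m.toNat : Nat) : Int) by omega]
        rw [PySem.Int.mod_natCast]
      have heq : ((i:Int) * i == m) = decide (i * i = m.toNat) := by
        rw [Bool.eq_iff_iff]; simp; omega
      rw [wNat, hmod, heq]
      simp only [beq_iff_eq, Nat.cast_eq_zero, decide_eq_true_eq]
  | case2 i hle =>
      have hgt : Nat.sqrt m.toNat < i := by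
        by_contra hcon
        rw [not_lt] at hcon
        have : i * i ≤ m.toNat := by nlinarith [Nat.sqrt_le' m.toNat]
        exact hle (by omega)
      rw [restSum, if_neg hle, Finset.Ico_eq_empty (by omega), Finset.sum_empty]

-- the divisors of n up to sqrt(n) are exactly n's divisors that are ≤ sqrt(n)
theorem small_eq (n : Nat) (hn : 1 ≤ n) :
    (Finset.Ico 1 (Nat.sqrt n + 1)).filter (fun j => n % j = 0)
      = n.divisors.filter (fun d => d ≤ Nat.sqrt n) := by
  ext j
  simp only [Finset.mem_filter, Finset.mem_Ico, Nat.mem_divisors]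
  constructor
  · rintro ⟨⟨h1, h2⟩, h3⟩
    exact ⟨⟨(Nat.dvd_iff_mod_eq_zero).mpr h3, by omega⟩, by omega⟩
  · rintro ⟨⟨hdvd, _⟩, hle⟩
    have hj1 : 1 ≤ j := Nat.pos_of_dvd_of_pos hdvd (by omega)
    exact ⟨⟨hj1, by omega⟩, (Nat.dvd_iff_mod_eq_zero).mp hdvd⟩

-- d ↦ n/d pairs the divisors above sqrt(n) with the ones at most sqrt(n) whose square is not n
theorem card_large (n : Nat) (hn : 1 ≤ n) :
    (n.divisors.filter (fun d => ¬ d ≤ Nat.sqrt n)).card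
      = (n.divisors.filter (fun d => d ≤ Nat.sqrt n ∧ d * d ≠ n)).card := by
  have hn0 : n ≠ 0 := by omega
  have hs1 : n < (Nat.sqrt n + 1) * (Nat.sqrt n + 1) := by
    have := Nat.lt_succ_sqrt' n; nlinarith [this]
  have hs2 : Nat.sqrt n * Nat.sqrt n ≤ n := by
    have := Nat.sqrt_le' n; nlinarith [this]
  apply Finset.card_nbij' (i := fun d => n / d) (j := fun d => n / d)
  · intro d hd
    simp only [Finset.mem_coe, Finset.mem_filter, Nat.mem_divisors, not_le] at hd ⊢
    obtain ⟨⟨hdvd, _⟩, hgt⟩ := hd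
    have hd1 : 1 ≤ d := Nat.pos_of_dvd_of_pos hdvd (by omega)
    have hmul : d * (n / d) = n := Nat.mul_div_cancel' hdvd
    have hq1 : 1 ≤ n / d := by
      rcases Nat.eq_zero_or_pos (n / d) with h | h
      · rw [h, Nat.mul_zero] at hmul; omega
      · exact h
    have hqle : n / d ≤ Nat.sqrt n := by
      by_contra hcon
      rw [not_le] at hcon
      nlinarith
    refine ⟨⟨Nat.div_dvd_of_dvd hdvd, hn0⟩, hqle, ?_⟩
    intro habs
    nlinarith
  · intro d hd
    simp only [Finset.mem_coe, Finset.mem_filter, Nat.mem_divisors, not_le] at hd ⊢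
    obtain ⟨⟨hdvd, _⟩, hle, hne⟩ := hd
    have hd1 : 1 ≤ d := Nat.pos_of_dvd_of_pos hdvd (by omega)
    have hmul : d * (n / d) = n := Nat.mul_div_cancel' hdvd
    have hq1 : 1 ≤ n / d := by
      rcases Nat.eq_zero_or_pos (n / d) with h | h
      · rw [h, Nat.mul_zero] at hmul; omega
      · exact h
    refine ⟨⟨Nat.div_dvd_of_dvd hdvd, hn0⟩, ?_⟩
    by_contra hcon
    rw [not_lt] at hcon
    have hnss : n = Nat.sqrt n * Nat.sqrt n := by nlinarith
    have hds : d = Nat.sqrt n := by nlinarith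
    have hqs : n / d = Nat.sqrt n := by nlinarith
    exact hne (by nlinarith)
  · intro d hd
    simp only [Finset.mem_coe, Finset.mem_filter, Nat.mem_divisors] at hd
    exact Nat.div_div_self hd.1.1 hn0
  · intro d hd
    simp only [Finset.mem_coe, Finset.mem_filter, Nat.mem_divisors] at hd
    exact Nat.div_div_self hd.1.1 hn0

-- the weighted sum up to sqrt(n) counts every divisor of n exactly once
theorem sqrt_sum_eq_card_divisors (n : Nat) (hn : 1 ≤ n) :
    ∑ j ∈ Finset.Ico 1 (Nat.sqrt n + 1), wNat n j = n.divisors.card := by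
  unfold wNat
  rw [← Finset.sum_filter, small_eq n hn]
  have hsplit : ∑ j ∈ n.divisors.filter (fun d => d ≤ Nat.sqrt n), (if j * j = n then 1 else 2)
      = (n.divisors.filter (fun d => d ≤ Nat.sqrt n)).card
        + (n.divisors.filter (fun d => d ≤ Nat.sqrt n ∧ d * d ≠ n)).card := by
    rw [Finset.sum_congr rfl (g := fun j => 1 + if j * j ≠ n then 1 else 0)
        (fun j _ => by by_cases h : j * j = n <;> simp [h]),
      Finset.sum_add_distrib, Finset.sum_const, smul_eq_mul, mul_one,
      Finset.sum_boole, ← Finset.filter_filter]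
    simp
  rw [hsplit, ← card_large n hn,
    Finset.card_filter_add_card_filter_not (s := n.divisors) (p := fun d => d ≤ Nat.sqrt n)]

theorem countP_range_eq (n : Nat) (p : Nat → Bool) :
    (List.range n).countP p = ((Finset.range n).filter (fun k => p k)).card := by
  induction n with
  | zero => simp
  | succ n ih =>
      rw [List.range_succ, List.countP_append, Finset.range_add_one, Finset.filter_insert]
      by_cases h : p n
      · rw [if_pos h, Finset.card_insert_of_notMem (by simp), ih]
        simp [h]
      · rw [if_neg h, ih]
        simp [h]

-- A's list of collected divisors has exactly as many entries as m.toNat has divisors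
theorem countA_eq_card_divisors (m : Int) (hm : 1 ≤ m) :
    ((PySem.List.pyRange 1 (m+1) 1).filter (fun i => PySem.Int.mod m i == 0)).length
      = m.toNat.divisors.card := by
  have hn : ((m + 1 - 1).toNat) = m.toNat := by omega
  rw [PySem.List.pyRange_one, hn, List.filter_map, List.length_map,
    ← List.countP_eq_length_filter]
  have hterm : ∀ k, (PySem.Int.mod m ((1:Int) + (k:Nat)) == 0) = decide ((1+k) ∣ m.toNat) := by
    intro k
    have h1 : ((1:Int) + (k:Nat)) = (((1+k : Nat)) : Int) := by push_cast; ring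
    have h2 : PySem.Int.mod m ((1+k : Nat) : Int) = ((m.toNat % (1+k) : Nat) : Int) := by
      conv_lhs => rw [show m = ((m.toNat : Nat) : Int) by omega]
      rw [PySem.Int.mod_natCast]
    rw [h1, h2, Bool.eq_iff_iff]
    simp only [beq_iff_eq, Nat.cast_eq_zero, decide_eq_true_eq,
      Nat.dvd_iff_mod_eq_zero]
  rw [List.countP_congr (fun k _ => by rw [Function.comp_apply, hterm k])]
  rw [countP_range_eq]
  have hdiv : m.toNat.divisors = (Finset.Ico 1 (m.toNat + 1)).filter (fun d => d ∣ m.toNat) := rfl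
  rw [hdiv, Finset.card_filter, Finset.card_filter,
    Finset.sum_Ico_eq_sum_range]
  simp

-- ===== VERDICT (by name: the statement is the Claim_ definition above) =====
theorem primeproduct_spec : Claim_equal_primeproduct := by
  intro m _
  unfold Spec_primeproduct
  simp only [primeproduct, primeproduct_alt, PySem.List.foldl_append_if_eq_filter,
    List.nil_append]
  by_cases hm : m ≤ 0
  · have h0 : (m + 1 - 1).toNat = 0 := by omega
    simp [hm]
  · rw [if_neg hm, ppLoop_eq, restSum_eq_sum m (by omega) 1 le_rfl,
      sqrt_sum_eq_card_divisors _ (by omega), countA_eq_card_divisors m (by omega)]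
    simp
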